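-- pv_equiv track=rewrite | github.com/nicolas-boisseau/AdventOfCode2023 | day12/impl.py | is_match_record
-- ===== SOURCE A (Python) =====
-- def is_match_record(spring_row, records):
--     r = []
--     current = 0
--     for c in spring_row:
--         if c == "#":
--             current += 1
--         else:
--             if current > 0:
--                 r.append(current)
--             current = 0
--     if current > 0:
--         r.append(current)
--     return r == records
-- ===== SOURCE B (Python) =====
-- import re
--
-- def is_match_record(spring_row, records):
--     return [len(m) for m in re.findall("#+", spring_row)] == records
-- ===== Notes on version B (the rewrite author's own statement) =====
-- stated objective: idiomatic
-- what changed: Replaces the explicit counter loop with flush-on-separator by a regex findall of '#+' runs mapped to their lengths and compared to records.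
import Mathlib
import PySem

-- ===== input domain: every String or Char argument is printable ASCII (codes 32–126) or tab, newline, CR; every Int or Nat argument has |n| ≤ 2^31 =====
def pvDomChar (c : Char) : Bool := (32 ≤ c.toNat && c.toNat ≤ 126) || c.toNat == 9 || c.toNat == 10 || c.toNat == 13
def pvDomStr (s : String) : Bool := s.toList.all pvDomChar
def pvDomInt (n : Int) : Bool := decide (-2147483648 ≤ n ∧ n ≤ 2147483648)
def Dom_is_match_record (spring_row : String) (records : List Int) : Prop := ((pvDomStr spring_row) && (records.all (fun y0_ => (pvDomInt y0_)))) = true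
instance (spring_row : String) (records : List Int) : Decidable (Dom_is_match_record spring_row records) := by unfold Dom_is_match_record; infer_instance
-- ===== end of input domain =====

-- B replaces A's explicit counter-with-flush loop by extracting the maximal '#'-runs
-- (regex findall in Python, run-extraction recursion here) and comparing their lengths; objective: more idiomatic.

-- ===== PORT A =====
def is_match_record (spring_row : String) (records : List Int) : Bool :=
  let st := spring_row.toList.foldl
    (fun (st : List Int × Int) c =>
      if c = '#' then (st.1, st.2 + 1)
      else if st.2 > 0 then (st.1 ++ [st.2], (0 : Int)) else (st.1, 0))
    ([], 0)
  let r := if st.2 > 0 then st.1 ++ [st.2] else st.1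
  decide (r = records)

-- ===== PORT B =====
-- port of re.findall("#+", s) mapped to lengths: scan to each '#'-run, take its length, continue after it
def pvRuns : List Char → List Int
  | [] => []
  | c :: cs =>
    if c = '#' then
      ((1 : Int) + (cs.takeWhile (· = '#')).length) :: pvRuns (cs.dropWhile (· = '#'))
    else pvRuns cs
termination_by l => l.length
decreasing_by
  · exact Nat.lt_succ_of_le (List.length_dropWhile_le _ _)
  · simp

def is_match_record_alt (spring_row : String) (records : List Int) : Bool :=
  decide (pvRuns spring_row.toList = records)

-- ===== PRECONDITION & SPEC =====
def Spec_is_match_record (spring_row : String) (records : List Int) (out : Bool) : Prop := out = is_match_record_alt spring_row records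
instance (spring_row : String) (records : List Int) (out : Bool) : Decidable (Spec_is_match_record spring_row records out) := by unfold Spec_is_match_record; infer_instance

-- ===== CLAIM (what is proved, stated in full; the proofs are below) =====
def Claim_equal_is_match_record : Prop := ∀ (spring_row : String) (records : List Int), Dom_is_match_record spring_row records → Spec_is_match_record spring_row records (is_match_record spring_row records)

-- ===== LEMMAS AND PROOFS =====

-- the run lengths still to be emitted, given the pending counter `cur`
def pvF (cur : Int) : List Char → List Int
  | [] => if cur > 0 then [cur] else []
  | c :: cs => if c = '#' then pvF (cur + 1) cs else (if cur > 0 then [cur] else []) ++ pvF 0 cs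

theorem pvF_foldl (cs : List Char) : ∀ (r : List Int) (cur : Int),
    (let st := cs.foldl
      (fun (st : List Int × Int) c =>
        if c = '#' then (st.1, st.2 + 1)
        else if st.2 > 0 then (st.1 ++ [st.2], (0 : Int)) else (st.1, 0))
      (r, cur)
     if st.2 > 0 then st.1 ++ [st.2] else st.1) = r ++ pvF cur cs := by
  induction cs with
  | nil => intro r cur; simp [pvF]; split <;> simp
  | cons c cs ih =>
    intro r cur
    simp only [List.foldl_cons, pvF]
    by_cases h : c = '#'
    · simp [h, ih]
    · by_cases h2 : cur > 0 <;> simp [h, h2, ih]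

theorem pvF_pos (cs : List Char) : ∀ n : Int, 0 < n →
    pvF n cs = (n + ((cs.takeWhile (· = '#')).length : Int)) :: pvF 0 (cs.dropWhile (· = '#')) := by
  induction cs with
  | nil => intro n hn; simp [pvF, hn]
  | cons c cs ih =>
    intro n hn
    by_cases h : c = '#'
    · have := ih (n + 1) (by omega)
      simp [pvF, h, List.takeWhile, List.dropWhile, this]
      ring
    · simp [pvF, h, hn, List.takeWhile, List.dropWhile]

theorem pvF_zero (cs : List Char) : pvF 0 cs = pvRuns cs := by
  induction hn : cs.length using Nat.strong_induction_on generalizing cs with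
  | _ n ih =>
    cases cs with
    | nil => simp [pvF, pvRuns]
    | cons c cs =>
      by_cases h : c = '#'
      · rw [pvF, pvRuns]
        have hlen : (cs.dropWhile (· = '#')).length < n := by
          subst hn
          exact Nat.lt_succ_of_le (List.length_dropWhile_le _ _)
        simp only [h, if_true]
        rw [pvF_pos cs (0 + 1) (by omega), ih _ hlen _ rfl]
        norm_num
      · rw [pvF, pvRuns]
        simp only [h, if_false]
        subst hn
        simpa using ih cs.length (by simp) cs rfl

-- ===== VERDICT (by name: the statement is the Claim_ definition above) =====
theorem is_match_record_spec : Claim_equal_is_match_record := by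
  intro s records _
  unfold Spec_is_match_record is_match_record is_match_record_alt
  simp only []
  rw [show ∀ p : List Int × Int, (if p.2 > 0 then p.1 ++ [p.2] else p.1) =
      (let st := p; if st.2 > 0 then st.1 ++ [st.2] else st.1) from fun _ => rfl]
  rw [pvF_foldl s.toList [] 0, pvF_zero]
  simp
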